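-- pv_equiv track=rewrite | github.com/ljm0850/algo-problem | baekjoon/13507 좋은 부분 문자열의 개수.py | solution
-- ===== SOURCE A (Python) =====
-- def solution(S:str,ls:list[int],k:int)->int:
--     value = set()
--     L = len(ls)
--     for s in range(L):
--         for e in range(s+1,L):
--             if ls[e]-ls[s] > k:
--                 break
--             value.add(S[s:e])
--     return len(value)
-- ===== SOURCE B (Python) =====
-- def solution(S: str, ls: list[int], k: int) -> int:
--     L = len(ls)
--     # phase 1: for each start s, find the first e > s violating ls[e]-ls[s] <= k
--     reach = []
--     for s in range(L):
--         e = s + 1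
--         while e < L and ls[e] - ls[s] <= k:
--             e += 1
--         reach.append(e)
--     # phase 2: collect all admitted slices, then dedup by sorting and counting run heads
--     cand = [S[s:e] for s in range(L) for e in range(s + 1, reach[s])]
--     cand.sort()
--     total = 0
--     prev = None
--     for x in cand:
--         if prev is None or x != prev:
--             total += 1
--         prev = x
--     return total
-- ===== Notes on version B (the rewrite author's own statement) =====
-- stated objective: alternative
-- what changed: B replaces A's on-the-fly hash-set accumulation inside the break loop by two phases: it first computes each start's admissible end with a while-scan, then lists all admitted slices and deduplicates by sorting and counting run heads.
import Mathlib
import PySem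

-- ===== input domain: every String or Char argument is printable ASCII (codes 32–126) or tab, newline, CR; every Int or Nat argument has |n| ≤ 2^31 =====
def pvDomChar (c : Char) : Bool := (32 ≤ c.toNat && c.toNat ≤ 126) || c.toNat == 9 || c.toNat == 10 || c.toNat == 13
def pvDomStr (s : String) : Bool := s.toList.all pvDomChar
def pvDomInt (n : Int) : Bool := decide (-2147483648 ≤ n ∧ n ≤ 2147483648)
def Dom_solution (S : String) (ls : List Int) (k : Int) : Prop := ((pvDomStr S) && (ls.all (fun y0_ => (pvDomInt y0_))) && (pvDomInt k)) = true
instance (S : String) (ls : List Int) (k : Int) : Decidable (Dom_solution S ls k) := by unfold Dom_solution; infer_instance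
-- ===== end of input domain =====

-- B replaces A's hash-set accumulation inside the break loop by two phases — compute each start's
-- admissible end, list all admitted slices, then sort and count run heads (sort-based dedup);
-- same result, different mechanism (objective: alternative).

-- ===== PORT A =====
-- inner 'for e in range(s+1, L): if ls[e]-ls[s] > k: break; value.add(S[s:e])'
def solutionInnerA (S : List Char) (ls : List Int) (k s : Int) :
    List Int → PySem.Set (List Char) → PySem.Set (List Char)
  | [], value => value
  | e :: rest, value =>
    if PySem.List.pyGetD ls e 0 - PySem.List.pyGetD ls s 0 > k then value
    else solutionInnerA S ls k s rest (PySem.Set.add value (PySem.List.slice S (some s) (some e)))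

def solution (S : String) (ls : List Int) (k : Int) : Int :=
  let L : Int := ls.length
  let value : PySem.Set (List Char) :=
    (PySem.List.pyRange 0 L 1).foldl
      (fun value s => solutionInnerA S.toList ls k s (PySem.List.pyRange (s + 1) L 1) value)
      PySem.Set.empty
  PySem.Set.len value

-- ===== PORT B =====
-- 'e = s + 1; while e < L and ls[e] - ls[s] <= k: e += 1'
def solutionReach (ls : List Int) (k L s e : Int) : Int :=
  if h : e < L ∧ PySem.List.pyGetD ls e 0 - PySem.List.pyGetD ls s 0 ≤ k then
    solutionReach ls k L s (e + 1)
  else e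
termination_by (L - e).toNat
decreasing_by omega

-- 'total = 0; prev = None; for x in cand: if prev is None or x != prev: total += 1; prev = x'
def solutionCount : Option (List Char) → Int → List (List Char) → Int
  | _, total, [] => total
  | prev, total, x :: rest =>
    if (match prev with | none => true | some p => decide (x ≠ p)) then
      solutionCount (some x) (total + 1) rest
    else
      solutionCount (some x) total rest

def solution_alt (S : String) (ls : List Int) (k : Int) : Int :=
  let L : Int := ls.length
  let reach : List Int :=
    (PySem.List.pyRange 0 L 1).foldl (fun acc s => acc ++ [solutionReach ls k L s (s + 1)]) []
  let cand : List (List Char) :=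
    (PySem.List.pyRange 0 L 1).foldl
      (fun acc s =>
        acc ++ (PySem.List.pyRange (s + 1) (PySem.List.pyGetD reach s 0) 1).map
          (fun e => PySem.List.slice S.toList (some s) (some e)))
      []
  -- cand.sort(): lexicographic order on List Char (Mathlib's linear order = Python's string order on ASCII)
  let sortedCand := @PySem.List.sorted (List Char) (List Char) List.instLinearOrder.toLT
    LinearOrder.toDecidableLT cand (fun x => x) false
  solutionCount none 0 sortedCand

-- ===== PRECONDITION & SPEC =====
def Spec_solution (S : String) (ls : List Int) (k : Int) (out : Int) : Prop := out = solution_alt S ls k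
instance (S : String) (ls : List Int) (k : Int) (out : Int) : Decidable (Spec_solution S ls k out) := by unfold Spec_solution; infer_instance

-- ===== CLAIM (what is proved, stated in full; the proofs are below) =====
def Claim_equal_solution : Prop := ∀ (S : String) (ls : List Int) (k : Int), Dom_solution S ls k → Spec_solution S ls k (solution S ls k)

-- ===== LEMMAS AND PROOFS =====

-- the per-start generated slices, phrased through B's reach bound
def genSlices (S : List Char) (ls : List Int) (k L s : Int) : List (List Char) :=
  (PySem.List.pyRange (s + 1) (solutionReach ls k L s (s + 1)) 1).map
    (fun e => PySem.List.slice S (some s) (some e))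

theorem le_solutionReach (ls : List Int) (k L s e : Int) : e ≤ solutionReach ls k L s e := by
  unfold solutionReach
  split
  · have := le_solutionReach ls k L s (e + 1); omega
  · omega
termination_by (L - e).toNat
decreasing_by omega

-- A's break loop over range(e, L) is the fold of Set.add over the slices up to B's reach
theorem innerA_eq (S : List Char) (ls : List Int) (k L s e : Int) (v : PySem.Set (List Char)) :
    solutionInnerA S ls k s (PySem.List.pyRange e L 1) v =
      ((PySem.List.pyRange e (solutionReach ls k L s e) 1).map
        (fun e => PySem.List.slice S (some s) (some e))).foldl PySem.Set.add v := by
  rw [solutionReach]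
  split
  · rename_i h
    rw [PySem.List.pyRange_one_cons h.1]
    have hlt : e < solutionReach ls k L s (e + 1) := by
      have := le_solutionReach ls k L s (e + 1); omega
    rw [PySem.List.pyRange_one_cons hlt]
    simp only [solutionInnerA, List.map_cons, List.foldl_cons]
    rw [if_neg (by omega)]
    exact innerA_eq S ls k L s (e + 1) _
  · rename_i h
    rw [PySem.List.pyRange_one_eq_nil (le_refl e)]
    by_cases he : e < L
    · have hk : PySem.List.pyGetD ls e 0 - PySem.List.pyGetD ls s 0 > k := by
        by_contra hc; exact h ⟨he, by omega⟩
      rw [PySem.List.pyRange_one_cons he]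
      simp [solutionInnerA, if_pos hk]
    · rw [PySem.List.pyRange_one_eq_nil (by omega)]
      simp [solutionInnerA]
termination_by (L - e).toNat
decreasing_by omega

-- distinct cardinality of a Python set built from a list
theorem setLen_eq_card (xs : List (List Char)) :
    PySem.Set.len (PySem.Set.ofList xs) = (xs.toFinset.card : Int) := by
  have hn : (PySem.Set.ofList xs).Nodup := PySem.Set.nodup_ofList xs
  have : (PySem.Set.ofList xs).toFinset = xs.toFinset := by
    ext y; simp [PySem.Set.mem_ofList xs y]
  have hlen : (PySem.Set.ofList xs).length = xs.toFinset.card := by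
    rw [← this, List.toFinset_card_of_nodup hn]
  simp [PySem.Set.len, hlen]

theorem card_cons_toFinset (x : List Char) (r : List (List Char)) :
    (x :: r).toFinset.card = (r.toFinset.erase x).card + 1 := by
  rw [List.toFinset_cons]
  by_cases hx : x ∈ r.toFinset
  · rw [Finset.insert_eq_of_mem hx, ← Finset.card_erase_add_one hx]
  · rw [Finset.card_insert_of_notMem hx, Finset.erase_eq_of_notMem hx]

theorem count_sorted_some (ys : List (List Char)) (hs : ys.Pairwise (· ≤ ·)) (p : List Char)
    (hp : ∀ y ∈ ys, p ≤ y) (total : Int) :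
    solutionCount (some p) total ys = total + ((ys.toFinset.erase p).card : Int) := by
  induction ys generalizing p total with
  | nil => simp [solutionCount]
  | cons x r ih =>
    have hxr : ∀ y ∈ r, x ≤ y := fun y hy => (List.pairwise_cons.mp hs).1 y hy
    have hsr : r.Pairwise (· ≤ ·) := (List.pairwise_cons.mp hs).2
    by_cases hxp : x = p
    · subst hxp
      simp only [solutionCount]
      rw [if_neg (by simp)]
      rw [ih hsr x hxr total]
      have : ((x :: r).toFinset.erase x) = r.toFinset.erase x := by
        simp [List.toFinset_cons, Finset.erase_insert_eq_erase]
      rw [this]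
    · simp only [solutionCount]
      rw [if_pos (by simp [hxp])]
      rw [ih hsr x hxr (total + 1)]
      have hpx : p < x := lt_of_le_of_ne (hp x (by simp)) (fun h => hxp h.symm)
      have hpi : p ∉ (x :: r).toFinset := by
        simp only [List.toFinset_cons, Finset.mem_insert, List.mem_toFinset]
        rintro (h | h)
        · exact hxp h.symm
        · exact absurd (lt_of_lt_of_le hpx (hxr p h)) (lt_irrefl p)
      rw [Finset.erase_eq_of_notMem hpi, card_cons_toFinset]
      push_cast; ring

theorem count_sorted_none (ys : List (List Char)) (hs : ys.Pairwise (· ≤ ·)) (total : Int) :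
    solutionCount none total ys = total + (ys.toFinset.card : Int) := by
  cases ys with
  | nil => simp [solutionCount]
  | cons x r =>
    have hxr : ∀ y ∈ r, x ≤ y := fun y hy => (List.pairwise_cons.mp hs).1 y hy
    have hsr : r.Pairwise (· ≤ ·) := (List.pairwise_cons.mp hs).2
    simp only [solutionCount, if_true]
    rw [count_sorted_some r hsr x hxr (total + 1), card_cons_toFinset]
    push_cast; ring

-- sort-then-count-run-heads equals the distinct cardinality
theorem count_eq_setLen (xs : List (List Char)) :
    solutionCount none 0 (@PySem.List.sorted (List Char) (List Char) List.instLinearOrder.toLT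
        LinearOrder.toDecidableLT xs (fun x => x) false) =
      PySem.Set.len (PySem.Set.ofList xs) := by
  have hperm : (@PySem.List.sorted (List Char) (List Char) List.instLinearOrder.toLT
      LinearOrder.toDecidableLT xs (fun x => x) false).Perm xs :=
    @PySem.List.sorted_perm (List Char) (List Char) List.instLinearOrder.toLT
      LinearOrder.toDecidableLT xs (fun x => x) false
  have hpw : (@PySem.List.sorted (List Char) (List Char) List.instLinearOrder.toLT
      LinearOrder.toDecidableLT xs (fun x => x) false).Pairwise (· ≤ ·) :=
    PySem.List.sorted_pairwise xs (fun x => x)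
  rw [count_sorted_none _ hpw 0, List.toFinset_eq_of_perm _ _ hperm, setLen_eq_card]
  ring

theorem solution_eq_setLen (S : String) (ls : List Int) (k : Int) :
    solution S ls k =
      PySem.Set.len (PySem.Set.ofList
        ((PySem.List.pyRange 0 (ls.length : Int) 1).flatMap
          (genSlices S.toList ls k (ls.length : Int)))) := by
  simp only [solution]
  congr 1
  rw [PySem.Set.ofList_eq_foldl, List.foldl_flatMap]
  refine PySem.List.foldl_congr_mem _ _ _ _ ?_
  intro v s _
  exact innerA_eq S.toList ls k (ls.length : Int) s (s + 1) v

theorem solution_alt_eq (S : String) (ls : List Int) (k : Int) :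
    solution_alt S ls k =
      solutionCount none 0 (@PySem.List.sorted (List Char) (List Char) List.instLinearOrder.toLT
        LinearOrder.toDecidableLT
        ((PySem.List.pyRange 0 (ls.length : Int) 1).flatMap
          (genSlices S.toList ls k (ls.length : Int))) (fun x => x) false) := by
  simp only [solution_alt]
  have hcand :
      (PySem.List.pyRange 0 (ls.length : Int) 1).foldl
        (fun acc s =>
          acc ++ (PySem.List.pyRange (s + 1)
            (PySem.List.pyGetD
              ((PySem.List.pyRange 0 (ls.length : Int) 1).foldl
                (fun acc s => acc ++ [solutionReach ls k (ls.length : Int) s (s + 1)]) [])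
              s 0) 1).map
            (fun e => PySem.List.slice S.toList (some s) (some e)))
        [] =
      (PySem.List.pyRange 0 (ls.length : Int) 1).flatMap
        (genSlices S.toList ls k (ls.length : Int)) := by
    rw [PySem.List.foldl_congr_mem _ _
      (fun acc s => acc ++ genSlices S.toList ls k (ls.length : Int) s) []
      ?_]
    · rw [PySem.List.foldl_append_eq_flatMap, List.nil_append]
    · intro acc s hsmem
      have hb := (PySem.List.mem_pyRange_one).mp hsmem
      rw [PySem.List.foldl_append_singleton_eq_map
        (fun s => solutionReach ls k (ls.length : Int) s (s + 1))
        (PySem.List.pyRange 0 (ls.length : Int) 1) []]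
      simp only [List.nil_append]
      rw [PySem.List.pyGetD_map_pyRange_of_nonneg
        (fun s => solutionReach ls k (ls.length : Int) s (s + 1))
        (ls.length : Int) s 0 hb.1 hb.2]
      rfl
  rw [hcand]

-- ===== VERDICT (by name: the statement is the Claim_ definition above) =====
theorem solution_spec : Claim_equal_solution := by
  intro S ls k _
  unfold Spec_solution
  rw [solution_eq_setLen, solution_alt_eq, count_eq_setLen]
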